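-- pv_equiv track=rewrite | github.com/WonJoonoThomasChoi/CodingChallenge_Python | baekjoon/1316.py | check
-- ===== SOURCE A (Python) =====
-- def check(word):
--     alist = []
--     cur = word[0]
--     for i in range(1, len(word)):
--         if word[i] in alist:
--             return 0
--         if cur != word[i]:
--             alist.append(cur)
--             cur = word[i]
--     return 1
-- ===== SOURCE B (Python) =====
-- def check(word):
--     leaders = [word[0]] + [b for a, b in zip(word, word[1:]) if a != b]
--     return 1 if len(leaders) == len(set(leaders)) else 0
-- ===== Notes on version B (the rewrite author's own statement) =====
-- stated objective: simpler
-- what changed: B collapses the word into its maximal-run leaders with a single zip comprehension and then tests uniqueness of that list via a set, replacing A's incremental scan that carries a seen-list, does a membership test per character, and early-returns.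
import Mathlib
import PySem

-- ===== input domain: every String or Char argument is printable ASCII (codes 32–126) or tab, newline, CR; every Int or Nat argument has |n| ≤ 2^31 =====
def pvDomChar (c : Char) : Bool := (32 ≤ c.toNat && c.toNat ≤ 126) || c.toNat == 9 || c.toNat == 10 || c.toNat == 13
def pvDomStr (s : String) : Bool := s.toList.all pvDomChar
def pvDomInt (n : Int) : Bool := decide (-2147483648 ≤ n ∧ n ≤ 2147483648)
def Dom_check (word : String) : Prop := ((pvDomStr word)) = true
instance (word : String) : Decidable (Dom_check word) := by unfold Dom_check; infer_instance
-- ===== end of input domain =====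

-- B collapses the word into its run leaders with one zip comprehension and tests their set-uniqueness,
-- instead of A's incremental membership scan with early return; objective: simpler (no speed claim).

-- ===== PORT A =====
-- the for-loop of A over word[1:], carrying (alist, cur); early 'return 0' = returning 0 here
def checkGo (rest : List Char) (alist : List Char) (cur : Char) : Int :=
  match rest with
  | [] => 1
  | c :: rs =>
    if c ∈ alist then 0
    else if cur ≠ c then checkGo rs (alist ++ [cur]) c
    else checkGo rs alist cur

def check (word : String) : Int :=
  match word.toList with
  | [] => 0   -- word[0] raises IndexError in Python; excluded by Pre_check
  | c :: t => checkGo t [] c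

-- ===== PORT B =====
def check_alt (word : String) : Int :=
  match word.toList with
  | [] => 0   -- word[0] raises IndexError in Python; excluded by Pre_check
  | c :: t =>
    let leaders : List Char :=
      c :: (List.zip (c :: t) t).filterMap (fun p => if p.1 ≠ p.2 then some p.2 else none)
    if leaders.length = (PySem.Set.ofList leaders).length then 1 else 0

-- ===== PRECONDITION & SPEC =====
-- Pre_ excludes only the empty string, on which both Pythons raise IndexError at word[0].
def Pre_check (word : String) : Prop := word ≠ ""
instance (word : String) : Decidable (Pre_check word) := by unfold Pre_check; infer_instance
def pvWitness_check : String := "abba"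

def Spec_check (word : String) (out : Int) : Prop := out = check_alt word
instance (word : String) (out : Int) : Decidable (Spec_check word out) := by unfold Spec_check; infer_instance

-- ===== CLAIM (what is proved, stated in full; the proofs are below) =====
def Claim_equal_check : Prop := ∀ (word : String), Dom_check word → Pre_check word → Spec_check word (check word)

-- ===== LEMMAS AND PROOFS =====

-- the sequence of maximal-run leaders, the common characterisation of both programs
def collapse : List Char → List Char
  | [] => []
  | [a] => [a]
  | a :: b :: rs => if a = b then collapse (b :: rs) else a :: collapse (b :: rs)

theorem mem_collapse_self : ∀ (l : List Char) (a : Char), a ∈ collapse (a :: l) := by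
  intro l
  induction l with
  | nil => intro a; simp [collapse]
  | cons b rs ih =>
    intro a
    by_cases h : a = b
    · simp [collapse, h]; subst h; exact ih a
    · simp [collapse, h]

theorem leaders_eq_collapse : ∀ (l : List Char) (a : Char),
    a :: (List.zip (a :: l) l).filterMap (fun p => if p.1 ≠ p.2 then some p.2 else none)
      = collapse (a :: l) := by
  intro l
  induction l with
  | nil => intro a; simp [collapse]
  | cons b rs ih =>
    intro a
    by_cases h : a = b
    · simp [collapse, h, List.zip, ← ih b]
    · simp [collapse, h, List.zip, ← ih b]

theorem checkGo_eq : ∀ (rest alist : List Char) (cur : Char),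
    alist.Nodup → cur ∉ alist →
    checkGo rest alist cur = if (alist ++ collapse (cur :: rest)).Nodup then 1 else 0 := by
  intro rest
  induction rest with
  | nil =>
    intro alist cur hnd hcur
    simp [checkGo, collapse, List.nodup_append, hnd, hcur]
  | cons c rs ih =>
    intro alist cur hnd hcur
    by_cases hmem : c ∈ alist
    · have hc : c ∈ collapse (cur :: c :: rs) := by
        by_cases h : cur = c
        · simp [collapse, h]; exact mem_collapse_self rs c
        · simp [collapse, h]; exact Or.inr (mem_collapse_self rs c)
      have hnn : ¬ (alist ++ collapse (cur :: c :: rs)).Nodup := by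
        simp only [List.nodup_append, not_and]
        intro _ _ hdisj
        exact hdisj c hmem c hc rfl
      simp [checkGo, hmem, hnn]
    · by_cases hne : cur = c
      · subst hne
        have h := ih alist cur hnd hcur
        rw [show collapse (cur :: cur :: rs) = collapse (cur :: rs) by simp [collapse]]
        simpa [checkGo, hmem] using h
      · have h1 : (alist ++ [cur]).Nodup :=
          hnd.append (List.nodup_singleton _)
            (by simpa [List.disjoint_singleton] using hcur)
        have h2 : c ∉ alist ++ [cur] := by
          simp only [List.mem_append, List.mem_singleton]
          rintro (h | h)
          · exact hmem h
          · exact hne h.symm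
        have key := ih (alist ++ [cur]) c h1 h2
        have hcol : collapse (cur :: c :: rs) = cur :: collapse (c :: rs) := by
          simp [collapse, hne]
        simp only [checkGo, if_neg hmem, hcol, ne_eq, hne, not_false_iff, if_true, key,
          List.append_assoc, List.singleton_append]

theorem foldl_add_len_le : ∀ (L s : List Char),
    (L.foldl PySem.Set.add s).length ≤ s.length + L.length := by
  intro L
  induction L with
  | nil => intro s; simp
  | cons x L ih =>
    intro s
    simp only [List.foldl_cons]
    by_cases h : x ∈ s
    · have hadd : PySem.Set.add s x = s := by simp [PySem.Set.add, h]
      have := ih s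
      rw [hadd]; simp only [List.length_cons]; omega
    · have hadd : PySem.Set.add s x = s ++ [x] := by simp [PySem.Set.add, h]
      have := ih (s ++ [x])
      rw [hadd]
      simp only [List.length_cons, List.length_append, List.length_nil] at this ⊢
      omega

theorem foldl_add_len_eq_iff : ∀ (L s : List Char),
    (L.foldl PySem.Set.add s).length = s.length + L.length ↔
      ((∀ x ∈ L, x ∉ s) ∧ L.Nodup) := by
  intro L
  induction L with
  | nil => intro s; simp
  | cons x L ih =>
    intro s
    simp only [List.foldl_cons]
    by_cases hx : x ∈ s
    · have hadd : PySem.Set.add s x = s := by simp [PySem.Set.add, hx]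
      have hle := foldl_add_len_le L s
      rw [hadd]
      constructor
      · intro heq; exfalso; simp only [List.length_cons] at heq; omega
      · rintro ⟨hall, _⟩; exact absurd hx (hall x (by simp))
    · have hadd : PySem.Set.add s x = s ++ [x] := by simp [PySem.Set.add, hx]
      have hlen : s.length + (x :: L).length = (s ++ [x]).length + L.length := by
        simp [List.length_append]; omega
      rw [hadd, hlen, ih (s ++ [x])]
      constructor
      · rintro ⟨hall, hnd⟩
        have h1 : ∀ y ∈ L, y ∉ s ∧ y ≠ x := by
          intro y hy
          have := hall y hy
          simp only [List.mem_append, List.mem_singleton, not_or] at this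
          exact this
        refine ⟨?_, ?_⟩
        · intro y hy
          rcases List.mem_cons.mp hy with h | h
          · exact h ▸ hx
          · exact (h1 y h).1
        · exact List.nodup_cons.mpr ⟨fun hxl => (h1 x hxl).2 rfl, hnd⟩
      · rintro ⟨hall, hnd⟩
        have hnd' := List.nodup_cons.mp hnd
        refine ⟨?_, hnd'.2⟩
        intro y hy
        simp only [List.mem_append, List.mem_singleton, not_or]
        exact ⟨hall y (List.mem_cons_of_mem _ hy), fun he => hnd'.1 (he ▸ hy)⟩

theorem ofList_len_eq_iff (L : List Char) :
    ((PySem.Set.ofList L).length = L.length) ↔ L.Nodup := by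
  rw [PySem.Set.ofList_eq_foldl]
  have := foldl_add_len_eq_iff L []
  simp at this
  simpa using this

theorem check_alt_eq (word : String) (c : Char) (t : List Char)
    (h : word.toList = c :: t) :
    check_alt word = if (collapse (c :: t)).Nodup then 1 else 0 := by
  simp only [check_alt, h]
  rw [show (c :: (List.zip (c :: t) t).filterMap (fun p => if p.1 ≠ p.2 then some p.2 else none))
        = collapse (c :: t) from leaders_eq_collapse t c]
  by_cases hnd : (collapse (c :: t)).Nodup
  · simp [hnd, (ofList_len_eq_iff (collapse (c :: t))).mpr hnd]
  · have hne2 : ¬ (collapse (c :: t)).length = (PySem.Set.ofList (collapse (c :: t))).length := by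
      intro h'
      exact hnd ((ofList_len_eq_iff _).mp h'.symm)
    simp [hnd, hne2]

-- ===== VERDICT (by name: the statement is the Claim_ definition above) =====
theorem check_spec : Claim_equal_check := by
  intro word _ hpre
  unfold Spec_check
  match hw : word.toList with
  | [] =>
    exact absurd (by simpa using congrArg List.isEmpty hw) (by simpa [String.isEmpty_iff] using hpre)
  | c :: t =>
    rw [show check word = checkGo t [] c by simp [check, hw]]
    rw [checkGo_eq t [] c List.nodup_nil (by simp)]
    rw [check_alt_eq word c t hw]
    simp
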